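-- pv_equiv track=rewrite | github.com/nttmkhang/LapTrinhThiDau01 | 6.2.1_Python/_6.2.1_Python.py | mulEgyptModulo
-- ===== SOURCE A (Python) =====
-- def mulEgyptModulo(a, b, M):
--     t = 0
--     while b >= 1:
--         if b % 2 != 0:
--             t = (t % M + a % M) % M
--         b = b // 2
--         a = a * 2
--     return t
-- ===== SOURCE B (Python) =====
-- def mulEgyptModulo(a, b, M):
--     # Recursive Russian-peasant multiplication: recurse on halved b / doubled a
--     if b < 1:
--         return 0
--     rest = mulEgyptModulo(a * 2, b // 2, M)
--     if b % 2 != 0: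
--         return (rest + a % M) % M
--     return rest
-- ===== Notes on version B (the rewrite author's own statement) =====
-- stated objective: alternative
-- what changed: Replaces A's iterative while-loop with an accumulator t by a direct recursion on the halved multiplier that combines the set-bit contributions on the way back up (no accumulator).
import Mathlib
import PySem

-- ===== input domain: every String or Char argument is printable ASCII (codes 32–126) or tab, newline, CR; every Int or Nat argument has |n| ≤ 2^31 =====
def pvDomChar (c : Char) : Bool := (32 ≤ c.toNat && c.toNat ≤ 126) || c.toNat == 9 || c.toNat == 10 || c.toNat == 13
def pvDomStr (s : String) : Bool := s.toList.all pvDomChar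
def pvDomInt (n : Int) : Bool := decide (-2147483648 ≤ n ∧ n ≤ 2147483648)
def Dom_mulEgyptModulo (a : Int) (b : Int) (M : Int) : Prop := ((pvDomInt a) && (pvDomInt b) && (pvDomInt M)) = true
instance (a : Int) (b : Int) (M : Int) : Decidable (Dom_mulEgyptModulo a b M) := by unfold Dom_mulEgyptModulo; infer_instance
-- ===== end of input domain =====

-- B replaces A's accumulator while-loop by a direct recursion on the halved multiplier (alternative decomposition, same cost).

-- ===== PORT A =====
-- the while-loop of A, state (t, a, b); M is fixed
def mulEgyptLoop (t : Int) (a : Int) (b : Int) (M : Int) : Int :=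
  if _h : 1 ≤ b then
    mulEgyptLoop
      (if PySem.Int.mod b 2 ≠ 0 then PySem.Int.mod (PySem.Int.mod t M + PySem.Int.mod a M) M else t)
      (a * 2) (PySem.Int.floordiv b 2) M
  else t
termination_by b.toNat
decreasing_by
  have := PySem.Int.floordiv_eq_ediv_of_pos (a := b) (b := 2) (by omega)
  omega

def mulEgyptModulo (a : Int) (b : Int) (M : Int) : Int :=
  mulEgyptLoop 0 a b M

-- ===== PORT B =====
def mulEgyptModulo_alt (a : Int) (b : Int) (M : Int) : Int :=
  if h : b < 1 then 0
  else
    let rest := mulEgyptModulo_alt (a * 2) (PySem.Int.floordiv b 2) M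
    if PySem.Int.mod b 2 ≠ 0 then PySem.Int.mod (rest + PySem.Int.mod a M) M else rest
termination_by b.toNat
decreasing_by
  have := PySem.Int.floordiv_eq_ediv_of_pos (a := b) (b := 2) (by omega)
  omega

-- ===== PRECONDITION & SPEC =====
-- Pre_ excludes exactly the inputs (b ≥ 1 and M = 0) on which A raises ZeroDivisionError (B raises there too).
def Pre_mulEgyptModulo (a : Int) (b : Int) (M : Int) : Prop := M ≠ 0 ∨ b < 1
instance (a : Int) (b : Int) (M : Int) : Decidable (Pre_mulEgyptModulo a b M) := by unfold Pre_mulEgyptModulo; infer_instance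
def pvWitness_mulEgyptModulo : Int × Int × Int := (7, 13, 5)

def Spec_mulEgyptModulo (a : Int) (b : Int) (M : Int) (out : Int) : Prop := out = mulEgyptModulo_alt a b M
instance (a : Int) (b : Int) (M : Int) (out : Int) : Decidable (Spec_mulEgyptModulo a b M out) := by unfold Spec_mulEgyptModulo; infer_instance

-- ===== CLAIM (what is proved, stated in full; the proofs are below) =====
def Claim_equal_mulEgyptModulo : Prop := ∀ (a : Int) (b : Int) (M : Int), Dom_mulEgyptModulo a b M → Pre_mulEgyptModulo a b M → Spec_mulEgyptModulo a b M (mulEgyptModulo a b M)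

-- ===== LEMMAS AND PROOFS =====

-- floored mod absorbs reduced summands (facts about PySem.Int.mod used by both inductions)
theorem pvModAddBoth (x y M : Int) :
    PySem.Int.mod (PySem.Int.mod x M + PySem.Int.mod y M) M = PySem.Int.mod (x + y) M := by
  simp [PySem.Int.mod]

theorem pvModAdd2 (t a y M : Int) :
    PySem.Int.mod (PySem.Int.mod (PySem.Int.mod t M + PySem.Int.mod a M) M + y) M
      = PySem.Int.mod (t + a + y) M := by
  simp [PySem.Int.mod]

theorem pvModSelf (a M : Int) : PySem.Int.mod (PySem.Int.mod a M) M = PySem.Int.mod a M := by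
  simp [PySem.Int.mod]

-- A's loop computes (t + a*b) mod M once the loop body runs (b >= 1)
theorem pvLoopEq (M : Int) : ∀ n : Nat, ∀ t a b : Int, b.toNat = n → 1 ≤ b →
    mulEgyptLoop t a b M = PySem.Int.mod (t + a * b) M := by
  intro n
  induction n using Nat.strong_induction_on with
  | _ n ih =>
    intro t a b hn hb
    have hfd := PySem.Int.floordiv_eq_ediv_of_pos (a := b) (b := 2) (by omega)
    have hsum := PySem.Int.floordiv_mul_add_mod b 2
    have hm2 := PySem.Int.mod_two_eq b
    rw [mulEgyptLoop]
    rw [dif_pos hb]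
    by_cases hodd : PySem.Int.mod b 2 ≠ 0
    · have hb2 : PySem.Int.mod b 2 = 1 := by omega
      rw [if_pos hodd]
      by_cases h1 : b = 1
      · subst h1
        rw [mulEgyptLoop]
        rw [dif_neg (show ¬ (1 ≤ PySem.Int.floordiv 1 2) by omega)]
        rw [pvModAddBoth]
        congr 1; ring
      · have hge : 1 ≤ PySem.Int.floordiv b 2 := by omega
        rw [ih (PySem.Int.floordiv b 2).toNat (by omega) _ _ _ rfl hge]
        rw [pvModAdd2]
        congr 1
        have h2 : 2 * PySem.Int.floordiv b 2 = b - 1 := by omega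
        calc t + a + a * 2 * PySem.Int.floordiv b 2
            = t + a + a * (2 * PySem.Int.floordiv b 2) := by ring
          _ = t + a + a * (b - 1) := by rw [h2]
          _ = t + a * b := by ring
    · have hb2 : PySem.Int.mod b 2 = 0 := by omega
      have hge : 1 ≤ PySem.Int.floordiv b 2 := by omega
      rw [if_neg (by omega)]
      rw [ih (PySem.Int.floordiv b 2).toNat (by omega) _ _ _ rfl hge]
      congr 1
      have h2 : 2 * PySem.Int.floordiv b 2 = b := by omega
      calc t + a * 2 * PySem.Int.floordiv b 2
          = t + a * (2 * PySem.Int.floordiv b 2) := by ring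
        _ = t + a * b := by rw [h2]

-- B computes (a*b) mod M for b >= 1
theorem pvAltEq (M : Int) : ∀ n : Nat, ∀ a b : Int, b.toNat = n → 1 ≤ b →
    mulEgyptModulo_alt a b M = PySem.Int.mod (a * b) M := by
  intro n
  induction n using Nat.strong_induction_on with
  | _ n ih =>
    intro a b hn hb
    have hfd := PySem.Int.floordiv_eq_ediv_of_pos (a := b) (b := 2) (by omega)
    have hsum := PySem.Int.floordiv_mul_add_mod b 2
    have hm2 := PySem.Int.mod_two_eq b
    rw [mulEgyptModulo_alt]
    rw [dif_neg (show ¬ b < 1 by omega)]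
    by_cases hodd : PySem.Int.mod b 2 ≠ 0
    · have hb2 : PySem.Int.mod b 2 = 1 := by omega
      rw [if_pos hodd]
      by_cases h1 : b = 1
      · subst h1
        rw [mulEgyptModulo_alt]
        rw [dif_pos (show PySem.Int.floordiv 1 2 < 1 by omega)]
        rw [zero_add, pvModSelf]
        congr 1; ring
      · have hge : 1 ≤ PySem.Int.floordiv b 2 := by omega
        rw [ih (PySem.Int.floordiv b 2).toNat (by omega) _ _ rfl hge]
        rw [pvModAddBoth]
        congr 1
        have h2 : 2 * PySem.Int.floordiv b 2 = b - 1 := by omega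
        calc a * 2 * PySem.Int.floordiv b 2 + a
            = a * (2 * PySem.Int.floordiv b 2) + a := by ring
          _ = a * (b - 1) + a := by rw [h2]
          _ = a * b := by ring
    · have hb2 : PySem.Int.mod b 2 = 0 := by omega
      have hge : 1 ≤ PySem.Int.floordiv b 2 := by omega
      rw [if_neg (by omega)]
      rw [ih (PySem.Int.floordiv b 2).toNat (by omega) _ _ rfl hge]
      congr 1
      have h2 : 2 * PySem.Int.floordiv b 2 = b := by omega
      calc a * 2 * PySem.Int.floordiv b 2
          = a * (2 * PySem.Int.floordiv b 2) := by ring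
        _ = a * b := by rw [h2]

-- ===== VERDICT (by name: the statement is the Claim_ definition above) =====
theorem mulEgyptModulo_spec : Claim_equal_mulEgyptModulo := by
  intro a b M _ _
  unfold Spec_mulEgyptModulo mulEgyptModulo
  by_cases hb : 1 ≤ b
  · rw [pvLoopEq M b.toNat 0 a b rfl hb, pvAltEq M b.toNat a b rfl hb, zero_add]
  · rw [mulEgyptLoop, mulEgyptModulo_alt]
    rw [dif_neg hb, dif_pos (show b < 1 by omega)]
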